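-- pv_equiv track=rewrite | github.com/codinglcy/Algorithm | 프로그래머스/lv1/131128. 숫자 짝꿍/숫자 짝꿍.py | solution
-- ===== SOURCE A (Python) =====
-- def solution(X, Y):
--     answer = -1
--     temp = []
--     Xdic = {'0':0, '1':0, '2':0, '3':0, '4':0, '5':0, '6':0, '7':0, '8':0, '9':0}
--     Ydic = {'0':0, '1':0, '2':0, '3':0, '4':0, '5':0, '6':0, '7':0, '8':0, '9':0}
--
--     for x in X:
--         Xdic[x] = Xdic[x]+1
--     for y in Y:
--         Ydic[y] = Ydic[y]+1
--
--     for n in range(9,-1,-1):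
--         n = str(n)
--         if Xdic[n] and Ydic[n]:
--             count = min(Xdic[n], Ydic[n])
--             for cnt in range(count):
--                 temp.append(n)
--
--     if not temp:
--         answer = '-1'
--     elif temp.count('0')==len(temp):
--         answer = '0'
--     else:
--         for tempnum in temp:
--             if answer==-1:
--                 answer = tempnum
--             else:
--                 answer += tempnum
--
--     return answer
-- ===== SOURCE B (Python) =====
-- def solution(X, Y):
--     xs = sorted(X, reverse=True)
--     ys = sorted(Y, reverse=True)
--     out = []
--     i = 0
--     j = 0
--     while i < len(xs) and j < len(ys):
--         if xs[i] == ys[j]: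
--             out.append(xs[i])
--             i += 1
--             j += 1
--         elif xs[i] > ys[j]:
--             i += 1
--         else:
--             j += 1
--     if not out:
--         return '-1'
--     if out[0] == '0':
--         return '0'
--     return ''.join(out)
-- ===== Notes on version B (the rewrite author's own statement) =====
-- stated objective: alternative
-- what changed: Replaced A's two digit-frequency dictionaries plus a fixed 9..0 emission loop by sorting both strings descending and running a two-pointer merge that emits common digits, with the all-zero case detected by a head check instead of a full count.
import Mathlib
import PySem

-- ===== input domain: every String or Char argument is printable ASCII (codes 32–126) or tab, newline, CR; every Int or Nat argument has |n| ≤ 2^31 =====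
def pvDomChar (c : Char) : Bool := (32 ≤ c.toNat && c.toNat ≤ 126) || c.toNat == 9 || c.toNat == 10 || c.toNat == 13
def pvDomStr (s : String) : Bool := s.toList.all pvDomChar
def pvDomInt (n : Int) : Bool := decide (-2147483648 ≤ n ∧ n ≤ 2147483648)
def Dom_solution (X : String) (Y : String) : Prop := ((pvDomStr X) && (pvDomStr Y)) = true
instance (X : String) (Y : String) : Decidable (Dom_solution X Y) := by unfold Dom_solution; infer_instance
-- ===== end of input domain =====

-- B replaces A's digit-frequency dictionaries + fixed 9..0 emission loop by a sort-then-two-pointer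
-- merge of the two digit strings (objective: alternative algorithm of similar cost).


-- ===== PORT A =====
-- the literal {'0':0, …, '9':0} both counters start from
def pvDigitPairs : List (Char × Int) :=
  [('0',0),('1',0),('2',0),('3',0),('4',0),('5',0),('6',0),('7',0),('8',0),('9',0)]

def solution (X : String) (Y : String) : String :=
  let Xdic := X.toList.foldl (fun d x => d.insert x (d.getD x 0 + 1)) (PySem.Dict.ofList pvDigitPairs)
  let Ydic := Y.toList.foldl (fun d y => d.insert y (d.getD y 0 + 1)) (PySem.Dict.ofList pvDigitPairs)
  let temp : List Char := (PySem.List.pyRange 9 (-1) (-1)).foldl (fun t n =>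
      let c := (PySem.Int.toChars n).headI   -- n = str(n): a single digit character
      if Xdic.getD c 0 ≠ 0 ∧ Ydic.getD c 0 ≠ 0 then
        (PySem.List.pyRange 0 (min (Xdic.getD c 0) (Ydic.getD c 0)) 1).foldl (fun t _ => t ++ [c]) t
      else t) []
  if temp = [] then "-1"
  else if temp.count '0' = temp.length then "0"
  else
    -- answer starts as the int -1 (Option.none here) and becomes a string at the first append
    match temp.foldl (fun ans t =>
        match ans with
        | none => some [t]
        | some s => some (s ++ [t])) (none : Option (List Char)) with
    | none => "-1"
    | some s => String.ofList s

-- ===== PORT B =====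
-- two-pointer merge over the two descending-sorted digit lists (Source B's while loop);
-- the Nat argument is fuel, a totality guard only: the caller passes enough for the whole merge
def pvMergeDescF : Nat → List Char → List Char → List Char
  | 0, _, _ => []
  | _ + 1, [], _ => []
  | _ + 1, _ :: _, [] => []
  | f + 1, x :: xs, y :: ys =>
    if x = y then x :: pvMergeDescF f xs ys
    else if x > y then pvMergeDescF f xs (y :: ys)
    else pvMergeDescF f (x :: xs) ys

def pvMergeDesc (a b : List Char) : List Char := pvMergeDescF (a.length + b.length) a b

def solution_alt (X : String) (Y : String) : String :=
  let xs := PySem.List.sorted X.toList (fun c => c) true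
  let ys := PySem.List.sorted Y.toList (fun c => c) true
  let out := pvMergeDesc xs ys
  match out with
  | [] => "-1"
  | c :: _ => if c = '0' then "0" else String.ofList out

-- ===== PRECONDITION & SPEC =====
def pvAllDigits (s : String) : Bool := s.toList.all (fun c => decide (47 < c.toNat) && decide (c.toNat < 58))

-- Pre_ excludes exactly the inputs containing a non-digit character (code outside 48..57): there A
-- raises KeyError on the dict lookup.
def Pre_solution (X : String) (Y : String) : Prop :=
  (pvAllDigits X && pvAllDigits Y) = true
instance (X : String) (Y : String) : Decidable (Pre_solution X Y) := by unfold Pre_solution; infer_instance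

def pvWitness_solution : String × String := ("123", "321")

def Spec_solution (X : String) (Y : String) (out : String) : Prop := out = solution_alt X Y
instance (X : String) (Y : String) (out : String) : Decidable (Spec_solution X Y out) := by unfold Spec_solution; infer_instance

-- ===== CLAIM (what is proved, stated in full; the proofs are below) =====
def Claim_equal_solution : Prop := ∀ (X : String) (Y : String), Dom_solution X Y → Pre_solution X Y → Spec_solution X Y (solution X Y)

-- ===== LEMMAS AND PROOFS =====

-- the canonical common-digit list: for each digit 9..0, min(count in X, count in Y) copies
def pvRep (xs ys : List Char) (c : Char) : List Char :=
  List.replicate (min (xs.count c) (ys.count c)) c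
def pvCanon (xs ys : List Char) : List Char :=
  ((((((((pvRep xs ys '9' ++ pvRep xs ys '8') ++ pvRep xs ys '7') ++ pvRep xs ys '6')
    ++ pvRep xs ys '5') ++ pvRep xs ys '4') ++ pvRep xs ys '3') ++ pvRep xs ys '2')
    ++ pvRep xs ys '1') ++ pvRep xs ys '0'

theorem pv_counter_getD (l : List Char) (d : PySem.Dict Char Int) (c : Char) :
    (l.foldl (fun d x => d.insert x (d.getD x 0 + 1)) d).getD c 0 = d.getD c 0 + l.count c :=
  PySem.Dict.getD_foldl_modify_add_one l d c

theorem pv_dict0_getD (c : Char) : (PySem.Dict.ofList pvDigitPairs).getD c 0 = 0 := by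
  have h : PySem.Dict.ofList pvDigitPairs = PySem.Dict.mk pvDigitPairs := by decide
  rw [h]
  simp [pvDigitPairs, PySem.Dict.getD, PySem.Dict.get?_mk_cons]
  split_ifs <;> rfl

theorem pv_inner (k : Int) (t : List Char) (c : Char) :
    (PySem.List.pyRange 0 k 1).foldl (fun t _ => t ++ [c]) t = t ++ List.replicate k.toNat c := by
  rw [show (fun (t : List Char) (_ : Int) => t ++ [c]) = (fun t n => t ++ [(fun _ => c) n]) from rfl,
    PySem.List.foldl_append_singleton_eq_map]
  simp [List.map_const', PySem.List.length_pyRange_one]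

theorem pv_step (t : List Char) (c : Char) (a b : Nat) :
    (if (a : Int) ≠ 0 ∧ (b : Int) ≠ 0 then
        (PySem.List.pyRange 0 (min (a : Int) (b : Int)) 1).foldl (fun t _ => t ++ [c]) t
      else t) = t ++ List.replicate (min a b) c := by
  split_ifs with h
  · rw [pv_inner]; congr 1; congr 1; omega
  · have : min a b = 0 := by omega
    simp [this]

theorem pv_temp_eq (X Y : String) :
    ((PySem.List.pyRange 9 (-1) (-1)).foldl (fun t n =>
      let c := (PySem.Int.toChars n).headI
      if (X.toList.foldl (fun d x => d.insert x (d.getD x 0 + 1)) (PySem.Dict.ofList pvDigitPairs)).getD c 0 ≠ 0 ∧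
         (Y.toList.foldl (fun d y => d.insert y (d.getD y 0 + 1)) (PySem.Dict.ofList pvDigitPairs)).getD c 0 ≠ 0 then
        (PySem.List.pyRange 0 (min ((X.toList.foldl (fun d x => d.insert x (d.getD x 0 + 1)) (PySem.Dict.ofList pvDigitPairs)).getD c 0)
            ((Y.toList.foldl (fun d y => d.insert y (d.getD y 0 + 1)) (PySem.Dict.ofList pvDigitPairs)).getD c 0)) 1).foldl
          (fun t _ => t ++ [c]) t
      else t) []) = pvCanon X.toList Y.toList := by
  have hr : PySem.List.pyRange 9 (-1) (-1) = [9,8,7,6,5,4,3,2,1,0] := by decide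
  rw [hr]
  simp only [List.foldl, pv_counter_getD, pv_dict0_getD, zero_add]
  rw [pv_step, pv_step, pv_step, pv_step, pv_step, pv_step, pv_step, pv_step, pv_step, pv_step]
  simp [pvCanon, pvRep, show (PySem.Int.toChars 0).headI = '0' from by decide, show (PySem.Int.toChars 1).headI = '1' from by decide, show (PySem.Int.toChars 2).headI = '2' from by decide, show (PySem.Int.toChars 3).headI = '3' from by decide, show (PySem.Int.toChars 4).headI = '4' from by decide, show (PySem.Int.toChars 5).headI = '5' from by decide, show (PySem.Int.toChars 6).headI = '6' from by decide, show (PySem.Int.toChars 7).headI = '7' from by decide, show (PySem.Int.toChars 8).headI = '8' from by decide, show (PySem.Int.toChars 9).headI = '9' from by decide]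

theorem pv_mergeF_sublist (f : Nat) (a b : List Char) : (pvMergeDescF f a b).Sublist a := by
  induction f generalizing a b with
  | zero => simp [pvMergeDescF]
  | succ f ih =>
    match a, b with
    | [], _ => simp [pvMergeDescF]
    | _ :: _, [] => simp [pvMergeDescF]
    | x :: xs, y :: ys =>
      simp only [pvMergeDescF]
      split_ifs with h1 h2
      · exact (ih xs ys).cons₂ x
      · exact (ih xs (y :: ys)).cons x
      · exact ih (x :: xs) ys

theorem pv_mergeF_count (f : Nat) (a b : List Char) (hf : a.length + b.length ≤ f)
    (ha : a.Pairwise (fun x y => y ≤ x)) (hb : b.Pairwise (fun x y => y ≤ x)) (c : Char) :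
    (pvMergeDescF f a b).count c = min (a.count c) (b.count c) := by
  induction f generalizing a b with
  | zero =>
    match a, b with
    | [], _ => simp [pvMergeDescF]
    | _ :: _, _ => simp at hf
  | succ f ih =>
    match a, b with
    | [], _ => simp [pvMergeDescF]
    | _ :: _, [] => simp [pvMergeDescF]
    | x :: xs, y :: ys =>
      simp only [pvMergeDescF]
      rw [List.pairwise_cons] at ha hb
      split_ifs with h1 h2
      · subst h1
        rw [List.count_cons, List.count_cons,
          ih xs ys (by simp at hf ⊢; omega) ha.2 hb.2, List.count_cons]
        by_cases hc : x = c <;> simp [hc]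
      · -- x > y : x cannot occur in y :: ys
        rw [ih xs (y :: ys) (by simp at hf ⊢; omega) ha.2 (List.pairwise_cons.mpr hb)]
        by_cases hc : c = x
        · have h0 : (y :: ys).count c = 0 := by
            rw [List.count_eq_zero]
            intro hmem
            rcases List.mem_cons.mp hmem with h | h
            · exact h1 (hc ▸ h ▸ rfl)
            · exact absurd (hc ▸ hb.1 c h) (not_le.mpr h2)
          rw [h0, hc, List.count_cons_self]
          omega
        · rw [List.count_cons_of_ne (Ne.symm hc)]
      · -- x < y : y cannot occur in x :: xs
        rw [ih (x :: xs) ys (by simp at hf ⊢; omega) (List.pairwise_cons.mpr ha) hb.2]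
        have hxy : x < y := lt_of_le_of_ne (not_lt.mp h2) h1
        by_cases hc : c = y
        · have h0 : (x :: xs).count c = 0 := by
            rw [List.count_eq_zero]
            intro hmem
            rcases List.mem_cons.mp hmem with h | h
            · exact h1 ((h ▸ hc).symm ▸ rfl)
            · exact absurd (hc ▸ ha.1 c h) (not_le.mpr hxy)
          rw [h0, hc, List.count_cons_self]
          omega
        · rw [List.count_cons_of_ne (Ne.symm hc)]

theorem pv_canon_mem (xs ys : List Char) (c : Char) (h : c ∈ pvCanon xs ys) :
    c ∈ "0123456789".toList := by
  simp [pvCanon, pvRep, List.mem_replicate] at h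
  rcases h with h|h|h|h|h|h|h|h|h|h <;> simp [h.2]

theorem pv_canon_pairwise (xs ys : List Char) :
    (pvCanon xs ys).Pairwise (fun x y => y ≤ x) := by
  simp only [pvCanon, pvRep, List.pairwise_append, List.mem_append, List.mem_replicate]
  refine ⟨⟨⟨⟨⟨⟨⟨⟨⟨?_, ?_, ?_⟩, ?_, ?_⟩, ?_, ?_⟩, ?_, ?_⟩, ?_, ?_⟩, ?_, ?_⟩, ?_, ?_⟩, ?_, ?_⟩, ?_, ?_⟩ <;>
    first
      | exact List.pairwise_replicate_of_refl
      | (intro a ha b hb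
         obtain ⟨-, rfl⟩ := hb
         repeat' rcases ha with ha | ha
         all_goals obtain ⟨-, rfl⟩ := ha
         all_goals decide)

theorem pv_merge_eq_canon (xs ys : List Char)
    (hx : ∀ c ∈ xs, c ∈ "0123456789".toList) :
    pvMergeDesc (PySem.List.sorted xs (fun c => c) true) (PySem.List.sorted ys (fun c => c) true)
      = pvCanon xs ys := by
  set sx := PySem.List.sorted xs (fun c => c) true with hsx_def
  set sy := PySem.List.sorted ys (fun c => c) true with hsy_def
  have hpx : sx.Pairwise (fun a b => b ≤ a) := PySem.List.sorted_pairwise_rev xs _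
  have hpy : sy.Pairwise (fun a b => b ≤ a) := PySem.List.sorted_pairwise_rev ys _
  have hcx : ∀ c : Char, sx.count c = xs.count c := fun c => (PySem.List.sorted_perm xs _ _).count_eq c
  have hcy : ∀ c : Char, sy.count c = ys.count c := fun c => (PySem.List.sorted_perm ys _ _).count_eq c
  have hcount : ∀ c : Char, (pvMergeDesc sx sy).count c = (pvCanon xs ys).count c := by
    intro c
    rw [pvMergeDesc, pv_mergeF_count (sx.length + sy.length) sx sy le_rfl hpx hpy, hcx, hcy]
    by_cases hc : c ∈ "0123456789".toList
    · have hL : ("0123456789".toList) = ['0','1','2','3','4','5','6','7','8','9'] := by decide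
      rw [hL] at hc
      simp only [List.mem_cons, List.not_mem_nil, or_false] at hc
      rcases hc with rfl|rfl|rfl|rfl|rfl|rfl|rfl|rfl|rfl|rfl <;>
        simp [pvCanon, pvRep, List.count_append, List.count_replicate]
    · have h1 : xs.count c = 0 := List.count_eq_zero.mpr (fun h => hc (hx c h))
      have h2 : (pvCanon xs ys).count c = 0 := List.count_eq_zero.mpr (fun h => hc (pv_canon_mem xs ys c h))
      simp [h1, h2]
  have hperm : (pvMergeDesc sx sy).Perm (pvCanon xs ys) := List.perm_iff_count.mpr hcount
  exact hperm.eq_of_pairwise (fun a b _ _ h1 h2 => le_antisymm h2 h1)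
    (hpx.sublist (pv_mergeF_sublist _ sx sy)) (pv_canon_pairwise xs ys)

theorem pv_join_fold (l : List Char) (s : List Char) :
    (l.foldl (fun ans t =>
        match ans with
        | none => some [t]
        | some s => some (s ++ [t])) (some s)) = some (s ++ l) := by
  induction l generalizing s with
  | nil => simp
  | cons c l ih => simp [List.foldl_cons, ih]

theorem pv_char_of_toNat (c d : Char) (h : c.toNat = d.toNat) : c = d :=
  Char.ext (UInt32.toNat_inj.mp h)

theorem pv_range_mem (c : Char) (h1 : 47 < c.toNat) (h2 : c.toNat < 58) : c ∈ "0123456789".toList := by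
  have h1' : 48 ≤ c.toNat := h1
  have h2' : c.toNat ≤ 57 := by omega
  have hd : c.toNat = 48 ∨ c.toNat = 49 ∨ c.toNat = 50 ∨ c.toNat = 51 ∨ c.toNat = 52 ∨
      c.toNat = 53 ∨ c.toNat = 54 ∨ c.toNat = 55 ∨ c.toNat = 56 ∨ c.toNat = 57 := by omega
  rcases hd with h|h|h|h|h|h|h|h|h|h
  · have hc : c = '0' := pv_char_of_toNat c '0' (h.trans (by decide)); subst hc; decide
  · have hc : c = '1' := pv_char_of_toNat c '1' (h.trans (by decide)); subst hc; decide
  · have hc : c = '2' := pv_char_of_toNat c '2' (h.trans (by decide)); subst hc; decide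
  · have hc : c = '3' := pv_char_of_toNat c '3' (h.trans (by decide)); subst hc; decide
  · have hc : c = '4' := pv_char_of_toNat c '4' (h.trans (by decide)); subst hc; decide
  · have hc : c = '5' := pv_char_of_toNat c '5' (h.trans (by decide)); subst hc; decide
  · have hc : c = '6' := pv_char_of_toNat c '6' (h.trans (by decide)); subst hc; decide
  · have hc : c = '7' := pv_char_of_toNat c '7' (h.trans (by decide)); subst hc; decide
  · have hc : c = '8' := pv_char_of_toNat c '8' (h.trans (by decide)); subst hc; decide
  · have hc : c = '9' := pv_char_of_toNat c '9' (h.trans (by decide)); subst hc; decide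

theorem pv_digit_ge_zero (b : Char) (h : b ∈ "0123456789".toList) : '0' ≤ b := by
  have hL : ("0123456789".toList) = ['0','1','2','3','4','5','6','7','8','9'] := by decide
  rw [hL] at h
  simp only [List.mem_cons, List.not_mem_nil, or_false] at h
  rcases h with rfl|rfl|rfl|rfl|rfl|rfl|rfl|rfl|rfl|rfl <;> decide

-- ===== VERDICT (by name: the statement is the Claim_ definition above) =====
theorem solution_spec : Claim_equal_solution := by
  intro X Y _ hpre
  unfold Pre_solution at hpre
  rw [Bool.and_eq_true] at hpre
  have hx : ∀ c ∈ X.toList, c ∈ "0123456789".toList := by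
    have h := hpre.1
    simp only [pvAllDigits, List.all_eq_true, Bool.and_eq_true, decide_eq_true_eq] at h
    exact fun c hc => pv_range_mem c (h c hc).1 (h c hc).2
  unfold Spec_solution
  show solution X Y = solution_alt X Y
  simp only [solution, solution_alt]
  rw [pv_temp_eq X Y, pv_merge_eq_canon X.toList Y.toList hx]
  have hmem : ∀ b ∈ pvCanon X.toList Y.toList, b ∈ "0123456789".toList :=
    fun b hb => pv_canon_mem _ _ b hb
  have hpw := pv_canon_pairwise X.toList Y.toList
  cases hout : pvCanon X.toList Y.toList with
  | nil => simp
  | cons c rest =>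
    rw [hout] at hmem hpw
    rw [List.pairwise_cons] at hpw
    simp only [reduceCtorEq, if_false]
    by_cases hc : c = '0'
    · have hall : ∀ b ∈ c :: rest, '0' = b := by
        intro b hb
        rcases List.mem_cons.mp hb with h | h
        · rw [h, hc]
        · exact le_antisymm (pv_digit_ge_zero b (hmem b hb)) (hc ▸ hpw.1 b h) |>.symm ▸ rfl
      rw [if_pos (List.count_eq_length.mpr hall), if_pos hc]
    · have hne : ¬ (c :: rest).count '0' = (c :: rest).length := by
        intro h
        exact hc ((List.count_eq_length.mp h c (List.mem_cons_self)).symm)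
      rw [if_neg hne, if_neg hc]
      rw [List.foldl_cons]
      simp only []
      rw [pv_join_fold rest [c]]
      rfl
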